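-- pv_equiv track=rewrite | github.com/pypi-data/pypi-mirror-339 | packages/simetri/simetri-0.0.6-py3-none-any.whl/simetri/helpers/utilities.py | sanitize_graph_edges
-- ===== SOURCE A (Python) =====
-- def sanitize_graph_edges(edges):
--     """Sanitize graph edges.
--
--     Args:
--         edges: A list of graph edges.
--
--     Returns:
--         A sanitized list of graph edges.
--     """
--     s_edge_set = set()
--     for edge in edges:
--         s_edge_set.add(frozenset(edge))
--     edges = [tuple(x) for x in s_edge_set]
--     edges = [(min(x), max(x)) for x in edges]
--     edges.sort()
--     return edges
-- ===== SOURCE B (Python) =====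
-- def sanitize_graph_edges(edges):
--     """Sanitize graph edges: sort normalized edges, then drop adjacent duplicates."""
--     norm = sorted((a, b) if a <= b else (b, a) for a, b in edges)
--     out = []
--     for e in norm:
--         if not out or out[-1] != e:
--             out.append(e)
--     return out
-- ===== Notes on version B (the rewrite author's own statement) =====
-- stated objective: alternative
-- what changed: Replaces A's hash-set (frozenset) dedup followed by a sort with sort-first on normalized pairs followed by a single linear adjacent-duplicate scan.
import Mathlib
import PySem

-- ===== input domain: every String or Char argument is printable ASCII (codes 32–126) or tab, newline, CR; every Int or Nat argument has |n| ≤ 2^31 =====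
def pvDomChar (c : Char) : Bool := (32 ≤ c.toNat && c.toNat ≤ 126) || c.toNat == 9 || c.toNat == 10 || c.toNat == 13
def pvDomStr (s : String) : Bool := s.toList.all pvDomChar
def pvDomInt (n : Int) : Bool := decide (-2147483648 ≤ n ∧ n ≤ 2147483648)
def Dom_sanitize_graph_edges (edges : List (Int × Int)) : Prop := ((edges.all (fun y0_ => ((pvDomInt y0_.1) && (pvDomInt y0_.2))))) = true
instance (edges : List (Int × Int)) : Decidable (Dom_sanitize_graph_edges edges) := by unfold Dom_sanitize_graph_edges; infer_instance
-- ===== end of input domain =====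

-- B replaces A's hash-set dedup-then-sort with sort-first on normalized pairs then a
-- single adjacent-duplicate scan (alternative decomposition, same asymptotic cost).


-- ===== PORT A =====
-- frozenset({a,b}) is encoded as the ordered pair (min,max) — an injective encoding with
-- the same equality; the Python `tuple(x)` order of a 2-element frozenset and the set's
-- iteration order are hash order, but every element is consumed only through min/max and
-- the final no-key sort of distinct elements, so the returned value is order-independent
-- and this port is exact on it.
def sanitize_graph_edges (edges : List (Int × Int)) : List (Int × Int) :=
  let s_edge_set : PySem.Set (Int × Int) :=
    edges.foldl (fun s edge => PySem.Set.add s (min edge.1 edge.2, max edge.1 edge.2)) PySem.Set.empty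
  let edges1 := s_edge_set.map (fun x => (x.1, x.2))                 -- [tuple(x) for x in s_edge_set]
  let edges2 := edges1.map (fun x => (min x.1 x.2, max x.1 x.2))     -- [(min(x), max(x)) for x in edges]
  PySem.List.sorted2 edges2 (fun x => x.1) (fun x => x.2)            -- edges.sort()  (lexicographic tuple order)

-- ===== PORT B =====
def sanitize_graph_edges_alt (edges : List (Int × Int)) : List (Int × Int) :=
  let norm := edges.map (fun e => if e.1 ≤ e.2 then e else (e.2, e.1))
  let srt := PySem.List.sorted2 norm (fun x => x.1) (fun x => x.2)
  srt.foldl (fun out e =>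
    if out = [] ∨ PySem.List.pyGet? out (-1) ≠ some e then out ++ [e] else out) []

-- ===== PRECONDITION & SPEC =====
def Spec_sanitize_graph_edges (edges : List (Int × Int)) (out : List (Int × Int)) : Prop := out = sanitize_graph_edges_alt edges
instance (edges : List (Int × Int)) (out : List (Int × Int)) : Decidable (Spec_sanitize_graph_edges edges out) := by unfold Spec_sanitize_graph_edges; infer_instance

-- ===== CLAIM (what is proved, stated in full; the proofs are below) =====
def Claim_equal_sanitize_graph_edges : Prop := ∀ (edges : List (Int × Int)), Dom_sanitize_graph_edges edges → Spec_sanitize_graph_edges edges (sanitize_graph_edges edges)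

-- ===== LEMMAS AND PROOFS =====

-- per-edge normalization, bound predicate, and the lexicographic scalar key
def pvNorm (e : Int × Int) : Int × Int := (min e.1 e.2, max e.1 e.2)
def pvBnd (p : Int × Int) : Prop := -2147483648 ≤ p.1 ∧ p.1 ≤ 2147483648 ∧ -2147483648 ≤ p.2 ∧ p.2 ≤ 2147483648
def pvKey (p : Int × Int) : Int := p.1 * 8589934592 + p.2

lemma pvKey_strict {p q : Int × Int} (hp : pvBnd p) (hq : pvBnd q)
    (hne : p ≠ q) (hle : pvKey p ≤ pvKey q) : pvKey p < pvKey q := by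
  rcases p with ⟨a, b⟩; rcases q with ⟨c, d⟩
  obtain ⟨h1, h2, h3, h4⟩ := hp; obtain ⟨h5, h6, h7, h8⟩ := hq
  have hne' : ¬(a = c ∧ b = d) := by intro ⟨x, y⟩; exact hne (by simp [x, y])
  simp only [pvKey] at *
  omega

lemma pvLtBool_eq {p q : Int × Int} (hp : pvBnd p) (hq : pvBnd q) :
    (decide (p.1 < q.1) || (!decide (q.1 < p.1) && decide (p.2 < q.2))) = decide (pvKey p < pvKey q) := by
  rcases p with ⟨a, b⟩; rcases q with ⟨c, d⟩
  obtain ⟨h1, h2, h3, h4⟩ := hp; obtain ⟨h5, h6, h7, h8⟩ := hq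
  by_cases hc1 : a < c <;> by_cases hc2 : c < a <;> by_cases hc3 : b < d <;>
    simp [hc1, hc2, hc3, pvKey] <;> omega

lemma insertBy_congr {α : Type} (b1 b2 : α → α → Bool) (x : α) (ys : List α)
    (h : ∀ y ∈ ys, b1 x y = b2 x y) :
    PySem.List.insertBy b1 x ys = PySem.List.insertBy b2 x ys := by
  induction ys with
  | nil => rfl
  | cons y ys ih =>
      simp only [PySem.List.insertBy]
      rw [h y (by simp), ih (fun z hz => h z (by simp [hz]))]

lemma foldl_insertBy_congr {α : Type} (P : α → Prop) (b1 b2 : α → α → Bool)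
    (hagree : ∀ x y, P x → P y → b1 x y = b2 x y) :
    ∀ (xs acc : List α), (∀ a ∈ acc, P a) → (∀ a ∈ xs, P a) →
      xs.foldl (fun acc x => PySem.List.insertBy b1 x acc) acc
        = xs.foldl (fun acc x => PySem.List.insertBy b2 x acc) acc := by
  intro xs
  induction xs with
  | nil => intro acc _ _; rfl
  | cons x xs ih =>
      intro acc hacc hxs
      simp only [List.foldl_cons]
      rw [insertBy_congr b1 b2 x acc
        (fun y hy => hagree x y (hxs x (by simp)) (hacc y hy))]
      exact ih _ (fun a ha => by
          rcases (PySem.List.mem_insertBy b2 x a acc).1 ha with h | h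
          · exact h ▸ hxs x (by simp)
          · exact hacc a h)
        (fun a ha => hxs a (by simp [ha]))

-- sorted2 with fst/snd keys is sorted by the scalar key, on bounded elements
lemma sorted2_eq_sorted_key (xs : List (Int × Int)) (hb : ∀ p ∈ xs, pvBnd p) :
    PySem.List.sorted2 xs (fun x => x.1) (fun x => x.2)
      = PySem.List.sorted xs pvKey := by
  rw [PySem.List.sorted_eq_foldl_insertBy]
  exact foldl_insertBy_congr pvBnd _ _ (fun p q hp hq => pvLtBool_eq hp hq) xs [] (by simp) hb

-- adjacent-dedup reference function and the fold that computes it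
def pvGo : Int × Int → List (Int × Int) → List (Int × Int)
  | _, [] => []
  | a, b :: l => if a = b then pvGo a l else b :: pvGo b l

def pvDedupAdj : List (Int × Int) → List (Int × Int)
  | [] => []
  | a :: l => a :: pvGo a l

lemma pyGet_snoc_neg1 (ys : List (Int × Int)) (a : Int × Int) :
    PySem.List.pyGet? (ys ++ [a]) (-1) = some a := by
  simp [PySem.List.pyGet?, PySem.List.pyIdx?]

lemma fold_dedup_go :
    ∀ (l ys : List (Int × Int)) (a : Int × Int),
      l.foldl (fun out e =>
          if out = [] ∨ PySem.List.pyGet? out (-1) ≠ some e then out ++ [e] else out) (ys ++ [a])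
        = ys ++ a :: pvGo a l := by
  intro l
  induction l with
  | nil => intro ys a; simp [pvGo]
  | cons b l ih =>
      intro ys a
      by_cases hab : a = b
      · simp [List.foldl_cons, hab, pvGo, ih]
      · simp only [List.foldl_cons, pyGet_snoc_neg1]
        rw [if_pos (by simp [hab])]
        have := ih (ys ++ [a]) b
        simp only [List.append_assoc, List.cons_append, List.nil_append] at this ⊢
        simp [this, pvGo, hab]

lemma alt_eq_dedupAdj (edges : List (Int × Int)) :
    sanitize_graph_edges_alt edges
      = pvDedupAdj (PySem.List.sorted2 (edges.map (fun e => if e.1 ≤ e.2 then e else (e.2, e.1)))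
          (fun x => x.1) (fun x => x.2)) := by
  unfold sanitize_graph_edges_alt
  show (PySem.List.sorted2 (edges.map (fun e => if e.1 ≤ e.2 then e else (e.2, e.1)))
      (fun x => x.1) (fun x => x.2)).foldl
      (fun out e => if out = [] ∨ PySem.List.pyGet? out (-1) ≠ some e then out ++ [e] else out) [] = _
  cases h : PySem.List.sorted2 (edges.map (fun e => if e.1 ≤ e.2 then e else (e.2, e.1)))
      (fun x => x.1) (fun x => x.2) with
  | nil => rfl
  | cons a l =>
      simp only [pvDedupAdj, List.foldl_cons]
      rw [if_pos (Or.inl trivial)]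
      simpa using fold_dedup_go l [] a

-- the dedup of a key-≤-sorted bounded list is strictly key-sorted with the same members
lemma go_spec :
    ∀ (l : List (Int × Int)) (a : Int × Int),
      (a :: l).Pairwise (fun p q => pvKey p ≤ pvKey q) → (∀ x ∈ a :: l, pvBnd x) →
      (a :: pvGo a l).Pairwise (fun p q => pvKey p < pvKey q)
        ∧ (∀ x, x ∈ a :: pvGo a l ↔ x ∈ a :: l) := by
  intro l
  induction l with
  | nil => intro a _ _; simp [pvGo]
  | cons b l ih =>
      intro a hpw hb
      rw [List.pairwise_cons] at hpw
      obtain ⟨hale, hbl⟩ := hpw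
      by_cases hab : a = b
      · subst hab
        have hpw' : (a :: l).Pairwise (fun p q => pvKey p ≤ pvKey q) :=
          List.pairwise_cons.2 ⟨fun x hx => hale x (by simp [hx]), (List.pairwise_cons.1 hbl).2⟩
        have hb' : ∀ x ∈ a :: l, pvBnd x := fun x hx => hb x (by simp at hx ⊢; tauto)
        obtain ⟨ih1, ih2⟩ := ih a hpw' hb'
        refine ⟨by simpa [pvGo] using ih1, ?_⟩
        intro x
        have := ih2 x
        simp only [pvGo, List.mem_cons] at this ⊢
        tauto
      · obtain ⟨ih1, ih2⟩ := ih b hbl (fun x hx => hb x (by simp at hx ⊢; tauto))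
        have hkab : pvKey a < pvKey b :=
          pvKey_strict (hb a (by simp)) (hb b (by simp)) hab (hale b (by simp))
        constructor
        · simp only [pvGo, if_neg hab]
          refine List.pairwise_cons.2 ⟨?_, ih1⟩
          intro x hx
          rcases List.mem_cons.1 ((ih2 x).1 hx) with h | h
          · rw [h]; exact hkab
          · exact lt_of_lt_of_le hkab ((List.pairwise_cons.1 hbl).1 x h)
        · intro x
          have := ih2 x
          simp only [pvGo, if_neg hab, List.mem_cons] at this ⊢
          tauto

lemma pairwise_lt_of_le_nodup {l : List (Int × Int)} (hb : ∀ p ∈ l, pvBnd p)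
    (hle : l.Pairwise (fun p q => pvKey p ≤ pvKey q)) (hnd : l.Nodup) :
    l.Pairwise (fun p q => pvKey p < pvKey q) :=
  (hle.and hnd).imp_of_mem (fun {a b} ha hb' h =>
    pvKey_strict (hb a ha) (hb b hb') h.2 h.1)

-- ===== VERDICT (by name: the statement is the Claim_ definition above) =====
theorem sanitize_graph_edges_spec : Claim_equal_sanitize_graph_edges := by
  intro edges hdom
  unfold Spec_sanitize_graph_edges
  unfold Dom_sanitize_graph_edges at hdom
  rw [List.all_eq_true] at hdom
  have hnormmap : edges.map (fun e => if e.1 ≤ e.2 then e else (e.2, e.1)) = edges.map pvNorm := by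
    apply List.map_congr_left
    intro e _
    by_cases h : e.1 ≤ e.2 <;> simp [pvNorm, h, min_def, max_def]
  have hbnorm : ∀ p ∈ edges.map pvNorm, pvBnd p := by
    intro p hp
    rw [List.mem_map] at hp
    obtain ⟨e, he, rfl⟩ := hp
    have := hdom e he
    simp only [pvDomInt, Bool.and_eq_true, decide_eq_true_eq] at this
    obtain ⟨⟨h1, h2⟩, h3, h4⟩ := this
    refine ⟨?_, ?_, ?_, ?_⟩ <;> simp only [pvNorm, min_def, max_def] <;> split <;> omega
  have hset : edges.foldl (fun s edge => PySem.Set.add s (min edge.1 edge.2, max edge.1 edge.2))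
      PySem.Set.empty = PySem.Set.ofList (edges.map pvNorm) := by
    have h1 := PySem.Set.update_map_eq_foldl_add edges pvNorm PySem.Set.empty
    simp only [pvNorm] at h1
    rw [← h1, show (PySem.Set.empty : PySem.Set (Int × Int)) = [] from rfl, PySem.Set.update_nil_left]
  have hmap1 : (PySem.Set.ofList (edges.map pvNorm)).map (fun x : Int × Int => (x.1, x.2))
      = PySem.Set.ofList (edges.map pvNorm) := by simp
  have hmap2 : (PySem.Set.ofList (edges.map pvNorm)).map (fun x => (min x.1 x.2, max x.1 x.2))
      = PySem.Set.ofList (edges.map pvNorm) := by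
    rw [show (PySem.Set.ofList (edges.map pvNorm)).map (fun x => (min x.1 x.2, max x.1 x.2))
          = (PySem.Set.ofList (edges.map pvNorm)).map (fun x => x) from ?_, List.map_id']
    apply List.map_congr_left
    intro p hp
    have hp' := (PySem.Set.mem_ofList (edges.map pvNorm) p).1 hp
    rw [List.mem_map] at hp'
    obtain ⟨e, _, rfl⟩ := hp'
    simp only [pvNorm]
    refine Prod.ext ?_ ?_ <;> simp only [min_def, max_def] <;> split_ifs <;> omega
  have hA : sanitize_graph_edges edges
      = PySem.List.sorted (PySem.Set.ofList (edges.map pvNorm)) pvKey := by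
    show PySem.List.sorted2
        (((edges.foldl (fun s edge => PySem.Set.add s (min edge.1 edge.2, max edge.1 edge.2))
            PySem.Set.empty).map (fun x => (x.1, x.2))).map (fun x => (min x.1 x.2, max x.1 x.2)))
        (fun x => x.1) (fun x => x.2) = _
    rw [hset, hmap1, hmap2]
    exact sorted2_eq_sorted_key _
      (fun p hp => hbnorm p ((PySem.Set.mem_ofList (edges.map pvNorm) p).1 hp))
  have hB : sanitize_graph_edges_alt edges
      = pvDedupAdj (PySem.List.sorted (edges.map pvNorm) pvKey) := by
    rw [alt_eq_dedupAdj, hnormmap, sorted2_eq_sorted_key _ hbnorm]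
  rw [hA, hB]
  have hbt : ∀ p ∈ PySem.List.sorted (edges.map pvNorm) pvKey, pvBnd p := fun p hp =>
    hbnorm p ((PySem.List.mem_sorted (edges.map pvNorm) pvKey false p).1 hp)
  have hdd : (pvDedupAdj (PySem.List.sorted (edges.map pvNorm) pvKey)).Pairwise
        (fun p q => pvKey p < pvKey q)
      ∧ (∀ x, x ∈ pvDedupAdj (PySem.List.sorted (edges.map pvNorm) pvKey)
          ↔ x ∈ PySem.List.sorted (edges.map pvNorm) pvKey) := by
    cases htc : PySem.List.sorted (edges.map pvNorm) pvKey with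
    | nil => simp [pvDedupAdj]
    | cons a l =>
        have := go_spec l a (htc ▸ PySem.List.sorted_pairwise (edges.map pvNorm) pvKey)
          (htc ▸ hbt)
        simpa [pvDedupAdj] using this
  have hRnd : (PySem.List.sorted (PySem.Set.ofList (edges.map pvNorm)) pvKey).Nodup :=
    ((PySem.List.sorted_perm (PySem.Set.ofList (edges.map pvNorm)) pvKey false).nodup_iff).2
      (PySem.Set.nodup_ofList (edges.map pvNorm))
  have hbR : ∀ p ∈ PySem.List.sorted (PySem.Set.ofList (edges.map pvNorm)) pvKey, pvBnd p :=
    fun p hp => hbnorm p ((PySem.Set.mem_ofList (edges.map pvNorm) p).1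
      ((PySem.List.mem_sorted (PySem.Set.ofList (edges.map pvNorm)) pvKey false p).1 hp))
  have hRlt : (PySem.List.sorted (PySem.Set.ofList (edges.map pvNorm)) pvKey).Pairwise
      (fun p q => pvKey p < pvKey q) :=
    pairwise_lt_of_le_nodup hbR (PySem.List.sorted_pairwise _ pvKey) hRnd
  have hddnd : (pvDedupAdj (PySem.List.sorted (edges.map pvNorm) pvKey)).Nodup :=
    hdd.1.imp (fun {a b} h => fun he => absurd (he ▸ h) (lt_irrefl _))
  have hmem : ∀ x, x ∈ PySem.List.sorted (PySem.Set.ofList (edges.map pvNorm)) pvKey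
      ↔ x ∈ pvDedupAdj (PySem.List.sorted (edges.map pvNorm) pvKey) := by
    intro x
    rw [hdd.2 x]
    simp [PySem.List.mem_sorted, PySem.Set.mem_ofList]
  have hperm := (List.perm_ext_iff_of_nodup hRnd hddnd).2 hmem
  exact List.eq_of_perm_of_sorted
    (fun a b _ _ h1 h2 => absurd h2 (not_lt.2 (le_of_lt h1))) hRlt hdd.1 hperm
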